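-- pv_equiv track=rewrite | github.com/AaronXu9/contrasCF | analysis/casf_mutagenesis/msa_fetch.py | _iter_a3m
-- ===== SOURCE A (Python) =====
-- def _iter_a3m(text: str):
--     """Yield (header, sequence) tuples from an A3M string. Wrapped sequences
--     are concatenated; non-AA characters are preserved (a3m keeps lowercase
--     insertions)."""
--     hdr = None
--     seq_parts: list[str] = []
--     for line in text.splitlines():
--         if line.startswith(">"):
--             if hdr is not None:
--                 yield hdr, "".join(seq_parts)
--             hdr = line
--             seq_parts = []
--         else:
--             if line:
--                 seq_parts.append(line)
--     if hdr is not None: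
--         yield hdr, "".join(seq_parts)
-- ===== SOURCE B (Python) =====
-- def _iter_a3m(text: str):
--     """Chunk-scan re-implementation: skip the preamble, then for each header
--     scan ahead to the next header and join the non-empty body lines."""
--     lines = text.splitlines()
--     n = len(lines)
--     k = 0
--     while k < n and not lines[k].startswith(">"):
--         k += 1
--     while k < n:
--         j = k + 1
--         while j < n and not lines[j].startswith(">"):
--             j += 1
--         yield lines[k], "".join(l for l in lines[k + 1 : j] if l)
--         k = j
-- ===== Notes on version B (the rewrite author's own statement) =====
-- stated objective: alternative
-- what changed: Replaces the streaming state machine with a pending (hdr, seq_parts) record by a two-pass chunk scan: skip the preamble, then for each header scan forward to the next header and join the non-empty lines in between.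
import Mathlib
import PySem

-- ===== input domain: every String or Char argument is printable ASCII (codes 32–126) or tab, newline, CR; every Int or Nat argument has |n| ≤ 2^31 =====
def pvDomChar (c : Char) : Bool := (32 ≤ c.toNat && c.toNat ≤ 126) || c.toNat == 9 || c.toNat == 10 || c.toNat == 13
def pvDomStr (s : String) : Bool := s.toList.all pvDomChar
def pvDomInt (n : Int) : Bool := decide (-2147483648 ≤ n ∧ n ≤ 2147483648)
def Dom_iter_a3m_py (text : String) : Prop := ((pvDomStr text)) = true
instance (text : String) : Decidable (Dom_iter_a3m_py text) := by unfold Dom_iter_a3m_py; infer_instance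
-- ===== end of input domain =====

-- B replaces A's streaming state machine (pending hdr/seq_parts) by a two-pass
-- chunk scan: skip the preamble, then per header scan ahead to the next header.
-- (A is a Python generator; equivalence is about the sequence of yielded pairs.)

-- ===== PORT A =====
-- A's loop state: hdr (Option String), seq_parts (List String); output accumulates in yield order.
def pvAGo : List String → Option String → List String → List (String × String)
  | [], hdr, parts =>
      match hdr with
      | some h => [(h, PySem.Str.join "" parts)]
      | none => []
  | l :: ls, hdr, parts =>
      if PySem.Str.startswith l ">" then
        (match hdr with
         | some h => [(h, PySem.Str.join "" parts)]
         | none => []) ++ pvAGo ls (some l) []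
      else
        pvAGo ls hdr (if l ≠ "" then parts ++ [l] else parts)

def iter_a3m_py (text : String) : List (String × String) :=
  pvAGo (PySem.Str.splitlines text) none []

-- ===== PORT B =====
-- "not lines[j].startswith('>')": a non-header line
def pvNonHdr (l : String) : Bool := !PySem.Str.startswith l ">"

-- B's inner 'while j < n and not startswith' scan = takeWhile/dropWhile split at the next header.
def pvBChunks : List String → List (String × String)
  | [] => []
  | h :: rest =>
      (h, PySem.Str.join "" ((rest.takeWhile pvNonHdr).filter (fun l => l ≠ ""))) ::
        pvBChunks (rest.dropWhile pvNonHdr)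
termination_by ls => ls.length
decreasing_by
  simp only [List.length_cons]
  exact Nat.lt_succ_of_le (List.length_dropWhile_le _ _)

-- B's first while loop (skip the preamble) is the dropWhile below.
def iter_a3m_py_alt (text : String) : List (String × String) :=
  pvBChunks ((PySem.Str.splitlines text).dropWhile pvNonHdr)

-- ===== PRECONDITION & SPEC =====
def Spec_iter_a3m_py (text : String) (out : List (String × String)) : Prop := out = iter_a3m_py_alt text
instance (text : String) (out : List (String × String)) : Decidable (Spec_iter_a3m_py text out) := by unfold Spec_iter_a3m_py; infer_instance

-- ===== CLAIM (what is proved, stated in full; the proofs are below) =====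
def Claim_equal_iter_a3m_py : Prop := ∀ (text : String), Dom_iter_a3m_py text → Spec_iter_a3m_py text (iter_a3m_py text)

-- ===== LEMMAS AND PROOFS =====

-- Once a header is pending, A's remaining run is that chunk's pair followed by B's chunks.
theorem pvAGo_some (ls : List String) : ∀ (h : String) (p : List String),
    pvAGo ls (some h) p =
      (h, PySem.Str.join "" (p ++ (ls.takeWhile pvNonHdr).filter (fun l => l ≠ ""))) ::
        pvBChunks (ls.dropWhile pvNonHdr) := by
  induction ls with
  | nil => intro h p; simp [pvAGo, pvBChunks]
  | cons l ls ih =>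
      intro h p
      by_cases hs : PySem.Str.startswith l ">"
      · have hn : pvNonHdr l = false := by simp only [pvNonHdr, hs, Bool.not_true]
        simp only [pvAGo, hs, List.takeWhile_cons, List.dropWhile_cons, hn,
          Bool.false_eq_true, if_false]
        rw [ih l []]
        simp [pvBChunks]
      · simp only [Bool.not_eq_true] at hs
        have hn : pvNonHdr l = true := by simp only [pvNonHdr, hs, Bool.not_false]
        simp only [pvAGo, hs, Bool.false_eq_true, if_false, List.takeWhile_cons,
          List.dropWhile_cons, hn, if_true]
        rw [ih]
        by_cases hl : l = ""
        · simp [hl]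
        · simp [hl]

-- Before the first header A only discards lines, so it equals B's chunks after the preamble drop.
theorem pvAGo_none (ls : List String) : ∀ (p : List String),
    pvAGo ls none p = pvBChunks (ls.dropWhile pvNonHdr) := by
  induction ls with
  | nil => intro p; simp [pvAGo, pvBChunks]
  | cons l ls ih =>
      intro p
      by_cases hs : PySem.Str.startswith l ">"
      · have hn : pvNonHdr l = false := by simp only [pvNonHdr, hs, Bool.not_true]
        simp only [pvAGo, hs, List.dropWhile_cons, hn, Bool.false_eq_true, if_false,
          List.nil_append]
        rw [pvAGo_some ls l []]
        simp [pvBChunks]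
      · simp only [Bool.not_eq_true] at hs
        have hn : pvNonHdr l = true := by simp only [pvNonHdr, hs, Bool.not_false]
        simp only [pvAGo, hs, Bool.false_eq_true, if_false, List.dropWhile_cons, hn, if_true]
        exact ih _

-- ===== VERDICT (by name: the statement is the Claim_ definition above) =====
theorem iter_a3m_py_spec : Claim_equal_iter_a3m_py := by
  intro text _
  unfold Spec_iter_a3m_py iter_a3m_py iter_a3m_py_alt
  exact pvAGo_none _ []
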